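-- pv_equiv track=rewrite | github.com/jon890/fos-openclaw | career-os/skills/cj-oliveyoung-java-backend-prep/scripts/refresh_topic_inventory.py | pick_secondary
-- ===== SOURCE A (Python) =====
-- def pick_secondary(items, recently_shown_keys, limit):
--     """비-backend 카테고리(tech-blog / AI / geek) 추천 선택.
--
--     1차: cooldown(최근 history N개) 안에 없는 항목을 reservoir 순서대로 선택.
--     2차: 부족하면 recently_shown 포함해서라도 채움.
--     reservoir 순서는 사람이 큐레이션한 우선도이므로 추가 정렬을 하지 않는다.
--     """
--     if not items:
--         return []
--     fresh = [item for item in items if item.get('key') not in recently_shown_keys]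
--     chosen = list(fresh[:limit])
--     if len(chosen) >= limit:
--         return chosen
--     chosen_keys = {item.get('key') for item in chosen}
--     for item in items:
--         if item.get('key') in chosen_keys:
--             continue
--         chosen.append(item)
--         chosen_keys.add(item.get('key'))
--         if len(chosen) >= limit:
--             break
--     return chosen[:limit]
-- ===== SOURCE B (Python) =====
-- def pick_secondary(items, recently_shown_keys, limit):
--     fresh = []
--     stale = []
--     for item in items:
--         if item.get('key') in recently_shown_keys:
--             stale.append(item)
--         else:
--             fresh.append(item)
--     seen = set()
--     deduped = []
--     for item in stale:
--         k = item.get('key')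
--         if k not in seen:
--             seen.add(k)
--             deduped.append(item)
--     return (fresh + deduped)[:limit]
-- ===== Notes on version B (the rewrite author's own statement) =====
-- stated objective: simpler
-- what changed: Replaces A's take-then-refill-with-membership-skips control flow (slice, early return, second scan over all items with a break) by one partition pass into fresh/stale, a dedup of the stale list, and a single final slice (fresh + deduped_stale)[:limit].
-- outside the precondition, e.g. on pick_secondary([{'key': 'a'}, {'key': 'b'}], {'b'}, -1): A returns [], B returns [{'key': 'a'}]
import Mathlib
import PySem

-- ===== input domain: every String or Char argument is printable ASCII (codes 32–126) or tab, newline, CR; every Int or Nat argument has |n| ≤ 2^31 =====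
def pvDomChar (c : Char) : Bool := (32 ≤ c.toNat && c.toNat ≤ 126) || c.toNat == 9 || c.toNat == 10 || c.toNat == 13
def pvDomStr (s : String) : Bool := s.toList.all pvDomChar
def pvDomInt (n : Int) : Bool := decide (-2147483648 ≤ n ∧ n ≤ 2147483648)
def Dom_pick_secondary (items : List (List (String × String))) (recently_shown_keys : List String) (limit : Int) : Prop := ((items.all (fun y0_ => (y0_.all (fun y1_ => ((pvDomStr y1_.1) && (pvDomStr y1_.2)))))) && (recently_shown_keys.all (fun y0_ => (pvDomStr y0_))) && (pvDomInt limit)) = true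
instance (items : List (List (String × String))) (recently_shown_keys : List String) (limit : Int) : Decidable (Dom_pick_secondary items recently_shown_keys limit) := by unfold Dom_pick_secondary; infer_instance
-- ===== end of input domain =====

-- B replaces A's take-then-refill control flow by one partition into fresh/stale, a stale dedup, and a single final slice (same cost, plainer).


-- ===== PORT A =====
-- item.get('key') on the dict `item`
def pvKey (item : List (String × String)) : Option String :=
  (PySem.Dict.mk item).get? "key"

-- `item.get('key') in recently_shown_keys` (None is never in a list of strings)
def pvInRecently (k : Option String) (recently : List String) : Bool :=
  match k with
  | some s => recently.contains s
  | none => false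

-- A's fill loop: `for item in items: … break when len(chosen) >= limit`
def pickFill (limit : Int) :
    List (List (String × String)) → List (List (String × String)) →
    PySem.Set (Option String) → List (List (String × String))
  | [], chosen, _ => chosen
  | it :: rest, chosen, keys =>
    if PySem.Set.contains keys (pvKey it) then pickFill limit rest chosen keys
    else
      let chosen' := chosen ++ [it]
      let keys' := PySem.Set.add keys (pvKey it)
      if limit ≤ (chosen'.length : Int) then chosen'
      else pickFill limit rest chosen' keys'

def pick_secondary (items : List (List (String × String))) (recently_shown_keys : List String) (limit : Int) : List (List (String × String)) :=
  if items = [] then []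
  else
    let fresh := items.filter (fun it => ! pvInRecently (pvKey it) recently_shown_keys)
    let chosen := PySem.List.slice fresh none (some limit)
    if limit ≤ (chosen.length : Int) then chosen
    else
      let keys := PySem.Set.ofList (chosen.map pvKey)
      PySem.List.slice (pickFill limit items chosen keys) none (some limit)

-- ===== PORT B =====
def pick_secondary_alt (items : List (List (String × String))) (recently_shown_keys : List String) (limit : Int) : List (List (String × String)) :=
  -- partition loop of Source B
  let fs := items.foldl
    (fun (p : List (List (String × String)) × List (List (String × String))) it =>
      if pvInRecently (pvKey it) recently_shown_keys then (p.1, p.2 ++ [it]) else (p.1 ++ [it], p.2))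
    ([], [])
  -- dedup loop of Source B over the stale list, with a seen-set
  let sd := fs.2.foldl
    (fun (p : PySem.Set (Option String) × List (List (String × String))) it =>
      if PySem.Set.contains p.1 (pvKey it) then p else (PySem.Set.add p.1 (pvKey it), p.2 ++ [it]))
    (PySem.Set.empty, [])
  PySem.List.slice (fs.1 ++ sd.2) none (some limit)

-- ===== PRECONDITION & SPEC =====
-- Pre_ excludes negative limit, where the value each program returns is an accident of its
-- final Python slice `[:limit]` (A returns fresh minus the last |limit| items, B the combined
-- list minus the last |limit| items) — a corner no caller of a "pick at most limit" helper specifies.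
def Pre_pick_secondary (items : List (List (String × String))) (recently_shown_keys : List String) (limit : Int) : Prop := 0 ≤ limit
instance (items : List (List (String × String))) (recently_shown_keys : List String) (limit : Int) : Decidable (Pre_pick_secondary items recently_shown_keys limit) := by unfold Pre_pick_secondary; infer_instance

def pvWitness_pick_secondary : (List (List (String × String))) × List String × Int :=
  ([[("key", "a")], [("key", "b")]], ["b"], 1)

def Spec_pick_secondary (items : List (List (String × String))) (recently_shown_keys : List String) (limit : Int) (out : List (List (String × String))) : Prop := out = pick_secondary_alt items recently_shown_keys limit
instance (items : List (List (String × String))) (recently_shown_keys : List String) (limit : Int) (out : List (List (String × String))) : Decidable (Spec_pick_secondary items recently_shown_keys limit out) := by unfold Spec_pick_secondary; infer_instance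

-- ===== CLAIM (what is proved, stated in full; the proofs are below) =====
def Claim_equal_pick_secondary : Prop := ∀ (items : List (List (String × String))) (recently_shown_keys : List String) (limit : Int), Dom_pick_secondary items recently_shown_keys limit → Pre_pick_secondary items recently_shown_keys limit → Spec_pick_secondary items recently_shown_keys limit (pick_secondary items recently_shown_keys limit)

-- ===== LEMMAS AND PROOFS =====

-- proof-only recursive form of B's dedup loop
def pvDedup : List (List (String × String)) → PySem.Set (Option String) → List (List (String × String))
  | [], _ => []
  | it :: rest, s =>
    if PySem.Set.contains s (pvKey it) then pvDedup rest s
    else it :: pvDedup rest (PySem.Set.add s (pvKey it))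

lemma pv_partition_fold (q : List (String × String) → Bool)
    (l a b : List (List (String × String))) :
    l.foldl (fun (p : List (List (String × String)) × List (List (String × String))) it =>
        if q it then (p.1, p.2 ++ [it]) else (p.1 ++ [it], p.2)) (a, b)
      = (a ++ l.filter (fun it => ! q it), b ++ l.filter q) := by
  induction l generalizing a b with
  | nil => simp
  | cons it rest ih =>
    by_cases h : q it <;> simp [h, ih]

lemma pv_dedup_fold (l : List (List (String × String)))
    (s : PySem.Set (Option String)) (acc : List (List (String × String))) :
    (l.foldl (fun (p : PySem.Set (Option String) × List (List (String × String))) it =>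
        if PySem.Set.contains p.1 (pvKey it) then p
        else (PySem.Set.add p.1 (pvKey it), p.2 ++ [it])) (s, acc)).2
      = acc ++ pvDedup l s := by
  induction l generalizing s acc with
  | nil => simp [pvDedup]
  | cons it rest ih =>
    by_cases h : pvKey it ∈ s
    · have hc : PySem.Set.contains s (pvKey it) = true := (PySem.Set.contains_iff _ _).mpr h
      simp only [List.foldl_cons, hc, if_true, pvDedup]
      exact ih s acc
    · have hc : PySem.Set.contains s (pvKey it) = false :=
        Bool.eq_false_iff.mpr (fun hh => h ((PySem.Set.contains_iff _ _).mp hh))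
      simp only [List.foldl_cons, hc, Bool.false_eq_true, if_false, pvDedup]
      rw [ih (PySem.Set.add s (pvKey it)) (acc ++ [it])]
      simp

-- the main invariant of A's fill loop
lemma pv_fill_eq (recently : List String) (limit : Int)
    (its : List (List (String × String))) :
    ∀ (chosen : List (List (String × String))) (keys seen : PySem.Set (Option String)),
    (chosen.length : Int) < limit →
    (∀ it ∈ its, pvInRecently (pvKey it) recently = false → pvKey it ∈ keys) →
    (∀ it ∈ its, pvInRecently (pvKey it) recently = true → (pvKey it ∈ keys ↔ pvKey it ∈ seen)) →
    pickFill limit its chosen keys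
      = List.take limit.toNat (chosen ++ pvDedup (its.filter (fun it => pvInRecently (pvKey it) recently)) seen) := by
  induction its with
  | nil =>
    intro chosen keys seen hlen _ _
    have h : chosen.length ≤ limit.toNat := by omega
    simp [pickFill, pvDedup, List.take_of_length_le h]
  | cons it rest ih =>
    intro chosen keys seen hlen hfresh hstale
    by_cases hm : pvKey it ∈ keys
    · -- A skips this item
      have hc : PySem.Set.contains keys (pvKey it) = true := (PySem.Set.contains_iff _ _).mpr hm
      by_cases hq : pvInRecently (pvKey it) recently = true
      · -- stale and already seen: B's dedup skips it too
        have hs : PySem.Set.contains seen (pvKey it) = true :=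
          (PySem.Set.contains_iff _ _).mpr ((hstale it (by simp) hq).mp hm)
        simp only [pickFill, hc, if_true, List.filter_cons, hq, pvDedup, hs]
        exact ih chosen keys seen hlen (fun x hx => hfresh x (by simp [hx]))
          (fun x hx => hstale x (by simp [hx]))
      · -- fresh: not in the stale list at all
        replace hq : pvInRecently (pvKey it) recently = false := by
          cases h : pvInRecently (pvKey it) recently
          · rfl
          · exact absurd h hq
        simp only [pickFill, hc, if_true, List.filter_cons, hq, Bool.false_eq_true, ite_false]
        exact ih chosen keys seen hlen (fun x hx => hfresh x (by simp [hx]))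
          (fun x hx => hstale x (by simp [hx]))
    · -- A appends this item; it must be stale and unseen
      have hq : pvInRecently (pvKey it) recently = true := by
        by_contra h
        exact hm (hfresh it (by simp) (by simpa using h))
      have hns : pvKey it ∉ seen := fun h => hm ((hstale it (by simp) hq).mpr h)
      have hc : PySem.Set.contains keys (pvKey it) = false :=
        Bool.eq_false_iff.mpr (fun hh => hm ((PySem.Set.contains_iff _ _).mp hh))
      have hsc : PySem.Set.contains seen (pvKey it) = false :=
        Bool.eq_false_iff.mpr (fun hh => hns ((PySem.Set.contains_iff _ _).mp hh))
      simp only [pickFill, hc, Bool.false_eq_true, if_false, List.filter_cons, hq, ite_true,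
        pvDedup, hsc]
      by_cases hstop : limit ≤ ((chosen ++ [it]).length : Int)
      · rw [if_pos hstop]
        have hlim : limit.toNat = chosen.length + 1 := by
          simp only [List.length_append, List.length_cons, List.length_nil] at hstop; omega
        rw [show chosen ++ it :: pvDedup (rest.filter fun x => pvInRecently (pvKey x) recently) (PySem.Set.add seen (pvKey it))
              = (chosen ++ [it]) ++ pvDedup (rest.filter fun x => pvInRecently (pvKey x) recently) (PySem.Set.add seen (pvKey it)) by simp]
        rw [List.take_append_of_le_length (by simp [hlim]), List.take_of_length_le (by simp [hlim])]
      · rw [if_neg hstop]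
        have hlen' : ((chosen ++ [it]).length : Int) < limit := by omega
        have := ih (chosen ++ [it]) (PySem.Set.add keys (pvKey it)) (PySem.Set.add seen (pvKey it)) hlen'
          (fun x hx hf => (PySem.Set.mem_add _ _ _).mpr (Or.inl (hfresh x (by simp [hx]) hf)))
          (fun x hx hs => by
            rw [PySem.Set.mem_add, PySem.Set.mem_add]
            exact or_congr (hstale x (by simp [hx]) hs) Iff.rfl)
        rw [this]
        simp

-- ===== VERDICT (by name: the statement is the Claim_ definition above) =====
theorem pick_secondary_spec : Claim_equal_pick_secondary := by
  intro items recently limit _ hpre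
  unfold Spec_pick_secondary pick_secondary pick_secondary_alt
  have h0 : (0 : Int) ≤ limit := hpre
  simp only [pv_partition_fold, pv_dedup_fold, List.nil_append]
  set q : List (String × String) → Bool := fun it => pvInRecently (pvKey it) recently with hq
  by_cases hnil : items = []
  · simp [hnil, pvDedup, PySem.List.slice_to _ h0]
  · rw [if_neg hnil]
    set fresh := items.filter (fun it => ! q it) with hfresh
    rw [PySem.List.slice_to _ h0]
    by_cases hbig : limit ≤ ((fresh.take limit.toNat).length : Int)
    · -- enough fresh items: both are fresh[:limit]
      rw [if_pos hbig]
      have hle : limit.toNat ≤ fresh.length := by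
        simp [List.length_take] at hbig; omega
      rw [PySem.List.slice_to _ h0, List.take_append_of_le_length hle]
    · -- not enough: chosen = fresh, fill from stale
      rw [if_neg hbig]
      have hlt : (fresh.length : Int) < limit := by
        simp [List.length_take] at hbig; omega
      have htk : fresh.take limit.toNat = fresh :=
        List.take_of_length_le (by omega)
      rw [htk]
      rw [pv_fill_eq recently limit items fresh (PySem.Set.ofList (fresh.map pvKey)) PySem.Set.empty hlt
        (fun it hit hf => by
          rw [PySem.Set.mem_ofList]
          exact List.mem_map.mpr ⟨it, List.mem_filter.mpr ⟨hit, by simp [hq, hf]⟩, rfl⟩)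
        (fun it hit hs => by
          constructor
          · intro hmem
            exfalso
            rw [PySem.Set.mem_ofList] at hmem
            obtain ⟨it', hit', hkey⟩ := List.mem_map.mp hmem
            have := (List.mem_filter.mp hit').2
            simp [hq] at this
            rw [hkey] at this
            rw [this] at hs
            exact Bool.false_ne_true hs
          · intro h; exact absurd h (List.not_mem_nil))]
      rw [PySem.List.slice_to _ h0, List.take_take, Nat.min_self, PySem.List.slice_to _ h0]
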